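-- pv_equiv track=rewrite | github.com/stenknutsen/HomeGrownPOSTagger | PhaseFiveTagging.py | to_UNK_how_to_UNK_Tagger
-- ===== SOURCE A (Python) =====
-- def to_UNK_how_to_UNK_Tagger(sent):
--     sentToReturn = []
--     skip = 0
--
--     for i in range(len(sent)):
--
--         if skip>0:
--             skip = skip -1
--             continue
--
--
--         if (i)<0 | (i+4)>=len(sent):
--             sentToReturn += [sent[i]]
--             continue
--
--         leftContext = sent[i]
--         leftTarget = sent[i+1]
--         centerTarget = sent[i+2]
--         rightTarget = sent[i+3]
--         rightContext = sent[i+4]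
--
--
--         if (leftContext[0].lower()=="to")&(leftTarget[1]=="UNK")&(centerTarget[0].lower()=="how")&(rightTarget[0].lower()=="to")&\
--                 (rightContext[1]=="UNK"):
--
--             sentToReturn += [(leftContext[0],"TO")]
--             sentToReturn += [(leftTarget[0],"V")]
--             sentToReturn += [centerTarget]
--             sentToReturn += [(rightTarget[0],"TO")]
--             sentToReturn += [(rightContext[0],"V")]
--             skip = 4
--
--         else:
--             sentToReturn += [leftContext]
--
--     return sentToReturn
-- ===== SOURCE B (Python) =====
-- def to_UNK_how_to_UNK_Tagger(sent):
--     n = len(sent)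
--     starts = set()
--     i = 0
--     while i + 4 < n:
--         if (sent[i][0].lower() == "to" and sent[i + 1][1] == "UNK"
--                 and sent[i + 2][0].lower() == "how" and sent[i + 3][0].lower() == "to"
--                 and sent[i + 4][1] == "UNK"):
--             starts.add(i)
--             i += 5
--         else:
--             i += 1
--     out = []
--     for j in range(n):
--         if j in starts:
--             out.append((sent[j][0], "TO"))
--             out.append((sent[j + 1][0], "V"))
--             out.append(sent[j + 2])
--             out.append((sent[j + 3][0], "TO"))
--             out.append((sent[j + 4][0], "V"))
--         elif any(j - k in (1, 2, 3, 4) for k in starts):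
--             continue
--         else:
--             out.append(sent[j])
--     return out
-- ===== Notes on version B (the rewrite author's own statement) =====
-- stated objective: alternative
-- what changed: Replaced A's single stateful loop with a mutable skip counter by a two-pass scheme: a first pass records the non-overlapping match-start indices in a set, then an index-driven second pass emits the rewritten window at a recorded start, skips indices covered by a window, and copies everything else.
import Mathlib
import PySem

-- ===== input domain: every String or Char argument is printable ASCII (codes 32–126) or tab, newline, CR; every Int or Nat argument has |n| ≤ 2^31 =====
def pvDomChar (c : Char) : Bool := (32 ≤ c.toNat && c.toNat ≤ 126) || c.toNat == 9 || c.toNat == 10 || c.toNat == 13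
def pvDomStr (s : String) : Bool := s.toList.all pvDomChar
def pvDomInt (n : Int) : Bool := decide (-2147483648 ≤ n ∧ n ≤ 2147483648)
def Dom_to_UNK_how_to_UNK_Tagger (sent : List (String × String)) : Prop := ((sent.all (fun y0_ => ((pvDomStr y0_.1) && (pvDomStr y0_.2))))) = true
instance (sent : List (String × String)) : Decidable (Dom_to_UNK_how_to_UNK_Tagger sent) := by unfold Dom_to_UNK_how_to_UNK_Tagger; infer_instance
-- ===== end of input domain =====

-- B: two-pass rewrite (first record the non-overlapping match-start indices, then emit per index)
-- instead of A's single stateful skip-counter loop; objective: alternative decomposition, not speed.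

-- ===== PORT A =====
-- A's for-loop with `continue` and the mutable skip counter, as structural recursion over the
-- index i with the same state (accumulated output, skip); fuel = remaining iterations (totality
-- guard only).  The guard `(i)<0 | (i+4)>=len(sent)` is Python's CHAINED comparison
-- `i < (0|(i+4)) >= len(sent)` (| binds tighter than < and >=); it is ported literally via Int.lor.
def pvALoop (sent : List (String × String)) (n : Nat) :
    Nat → Nat → Nat → List (String × String) → List (String × String)
  | 0, _, _, acc => acc
  | fuel + 1, i, skip, acc =>
    if i < n then
      if skip > 0 then
        pvALoop sent n fuel (i + 1) (skip - 1) acc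
      else if (Int.ofNat i < Int.lor 0 (Int.ofNat (i + 4))) ∧
              (Int.lor 0 (Int.ofNat (i + 4)) ≥ Int.ofNat n) then
        pvALoop sent n fuel (i + 1) skip
          (acc ++ [(PySem.List.pyGet? sent (Int.ofNat i)).getD ("", "")])
      else
        let leftContext := (PySem.List.pyGet? sent (Int.ofNat i)).getD ("", "")
        let leftTarget := (PySem.List.pyGet? sent (Int.ofNat (i + 1))).getD ("", "")
        let centerTarget := (PySem.List.pyGet? sent (Int.ofNat (i + 2))).getD ("", "")
        let rightTarget := (PySem.List.pyGet? sent (Int.ofNat (i + 3))).getD ("", "")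
        let rightContext := (PySem.List.pyGet? sent (Int.ofNat (i + 4))).getD ("", "")
        if (PySem.Str.lower leftContext.1 == "to") && (leftTarget.2 == "UNK") &&
           (PySem.Str.lower centerTarget.1 == "how") && (PySem.Str.lower rightTarget.1 == "to") &&
           (rightContext.2 == "UNK") then
          pvALoop sent n fuel (i + 1) 4
            (acc ++ [(leftContext.1, "TO")] ++ [(leftTarget.1, "V")] ++ [centerTarget] ++
              [(rightTarget.1, "TO")] ++ [(rightContext.1, "V")])
        else
          pvALoop sent n fuel (i + 1) skip (acc ++ [leftContext])
    else acc

def to_UNK_how_to_UNK_Tagger (sent : List (String × String)) : List (String × String) :=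
  pvALoop sent sent.length sent.length 0 0 []

-- ===== PORT B =====
-- the 5-token window test at start index i (Source B's `and`-chain, in the same order)
def pvBCond (sent : List (String × String)) (i : Nat) : Bool :=
  (PySem.Str.lower ((PySem.List.pyGet? sent (Int.ofNat i)).getD ("", "")).1 == "to") &&
  (((PySem.List.pyGet? sent (Int.ofNat (i + 1))).getD ("", "")).2 == "UNK") &&
  (PySem.Str.lower ((PySem.List.pyGet? sent (Int.ofNat (i + 2))).getD ("", "")).1 == "how") &&
  (PySem.Str.lower ((PySem.List.pyGet? sent (Int.ofNat (i + 3))).getD ("", "")).1 == "to") &&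
  (((PySem.List.pyGet? sent (Int.ofNat (i + 4))).getD ("", "")).2 == "UNK")

-- pass 1: the while-loop collecting the set of match starts (advance 5 on a hit, else 1);
-- fuel = remaining iterations (totality guard only)
def pvBScan (sent : List (String × String)) (n : Nat) :
    Nat → Nat → PySem.Set Nat → PySem.Set Nat
  | 0, _, starts => starts
  | fuel + 1, i, starts =>
    if i + 4 < n then
      if pvBCond sent i then pvBScan sent n fuel (i + 5) (PySem.Set.add starts i)
      else pvBScan sent n fuel (i + 1) starts
    else starts

-- pass 2: the for-loop over all indices j, as structural recursion over j with the output
-- accumulator; fuel = remaining iterations (totality guard only)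
def pvBEmit (sent : List (String × String)) (n : Nat) (starts : PySem.Set Nat) :
    Nat → Nat → List (String × String) → List (String × String)
  | 0, _, out => out
  | fuel + 1, j, out =>
    if j < n then
      if PySem.Set.contains starts j then
        pvBEmit sent n starts fuel (j + 1)
          (out ++ [(((PySem.List.pyGet? sent (Int.ofNat j)).getD ("", "")).1, "TO"),
                   (((PySem.List.pyGet? sent (Int.ofNat (j + 1))).getD ("", "")).1, "V"),
                   (PySem.List.pyGet? sent (Int.ofNat (j + 2))).getD ("", ""),
                   (((PySem.List.pyGet? sent (Int.ofNat (j + 3))).getD ("", "")).1, "TO"),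
                   (((PySem.List.pyGet? sent (Int.ofNat (j + 4))).getD ("", "")).1, "V")])
      else if List.any starts (fun k => List.contains [(1 : Int), 2, 3, 4] (Int.ofNat j - Int.ofNat k)) then
        pvBEmit sent n starts fuel (j + 1) out
      else
        pvBEmit sent n starts fuel (j + 1)
          (out ++ [(PySem.List.pyGet? sent (Int.ofNat j)).getD ("", "")])
    else out

def to_UNK_how_to_UNK_Tagger_alt (sent : List (String × String)) : List (String × String) :=
  let n := sent.length
  let starts := pvBScan sent n n 0 PySem.Set.empty
  pvBEmit sent n starts n 0 []

-- ===== PRECONDITION & SPEC =====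
def Spec_to_UNK_how_to_UNK_Tagger (sent : List (String × String)) (out : List (String × String)) : Prop := out = to_UNK_how_to_UNK_Tagger_alt sent
instance (sent : List (String × String)) (out : List (String × String)) : Decidable (Spec_to_UNK_how_to_UNK_Tagger sent out) := by unfold Spec_to_UNK_how_to_UNK_Tagger; infer_instance

-- ===== CLAIM (what is proved, stated in full; the proofs are below) =====
def Claim_equal_to_UNK_how_to_UNK_Tagger : Prop := ∀ (sent : List (String × String)), Dom_to_UNK_how_to_UNK_Tagger sent → Spec_to_UNK_how_to_UNK_Tagger sent (to_UNK_how_to_UNK_Tagger sent)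

-- ===== LEMMAS AND PROOFS =====

-- proof-side copies of the three loops without fuel (well-founded recursion), plus bridges
def pvALoopW (sent : List (String × String)) (n i skip : Nat)
    (acc : List (String × String)) : List (String × String) :=
  if h : i < n then
    if skip > 0 then
      pvALoopW sent n (i + 1) (skip - 1) acc
    else if (Int.ofNat i < Int.lor 0 (Int.ofNat (i + 4))) ∧
            (Int.lor 0 (Int.ofNat (i + 4)) ≥ Int.ofNat n) then
      pvALoopW sent n (i + 1) skip (acc ++ [(PySem.List.pyGet? sent (Int.ofNat i)).getD ("", "")])
    else
      let leftContext := (PySem.List.pyGet? sent (Int.ofNat i)).getD ("", "")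
      let leftTarget := (PySem.List.pyGet? sent (Int.ofNat (i + 1))).getD ("", "")
      let centerTarget := (PySem.List.pyGet? sent (Int.ofNat (i + 2))).getD ("", "")
      let rightTarget := (PySem.List.pyGet? sent (Int.ofNat (i + 3))).getD ("", "")
      let rightContext := (PySem.List.pyGet? sent (Int.ofNat (i + 4))).getD ("", "")
      if (PySem.Str.lower leftContext.1 == "to") && (leftTarget.2 == "UNK") &&
         (PySem.Str.lower centerTarget.1 == "how") && (PySem.Str.lower rightTarget.1 == "to") &&
         (rightContext.2 == "UNK") then
        pvALoopW sent n (i + 1) 4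
          (acc ++ [(leftContext.1, "TO")] ++ [(leftTarget.1, "V")] ++ [centerTarget] ++
            [(rightTarget.1, "TO")] ++ [(rightContext.1, "V")])
      else
        pvALoopW sent n (i + 1) skip (acc ++ [leftContext])
  else acc
termination_by n - i

def pvBScanW (sent : List (String × String)) (n i : Nat) (starts : PySem.Set Nat) :
    PySem.Set Nat :=
  if h : i + 4 < n then
    if pvBCond sent i then pvBScanW sent n (i + 5) (PySem.Set.add starts i)
    else pvBScanW sent n (i + 1) starts
  else starts
termination_by n - i

def pvBEmitW (sent : List (String × String)) (n : Nat) (starts : PySem.Set Nat) (j : Nat)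
    (out : List (String × String)) : List (String × String) :=
  if h : j < n then
    if PySem.Set.contains starts j then
      pvBEmitW sent n starts (j + 1)
        (out ++ [(((PySem.List.pyGet? sent (Int.ofNat j)).getD ("", "")).1, "TO"),
                 (((PySem.List.pyGet? sent (Int.ofNat (j + 1))).getD ("", "")).1, "V"),
                 (PySem.List.pyGet? sent (Int.ofNat (j + 2))).getD ("", ""),
                 (((PySem.List.pyGet? sent (Int.ofNat (j + 3))).getD ("", "")).1, "TO"),
                 (((PySem.List.pyGet? sent (Int.ofNat (j + 4))).getD ("", "")).1, "V")])
    else if List.any starts (fun k => List.contains [(1 : Int), 2, 3, 4] (Int.ofNat j - Int.ofNat k)) then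
      pvBEmitW sent n starts (j + 1) out
    else
      pvBEmitW sent n starts (j + 1) (out ++ [(PySem.List.pyGet? sent (Int.ofNat j)).getD ("", "")])
  else out
termination_by n - j


-- canonical form of the rewrite, used as the bridge between the two ports
def pvFive (sent : List (String × String)) (i : Nat) : List (String × String) :=
  [(((PySem.List.pyGet? sent (Int.ofNat i)).getD ("", "")).1, "TO"),
   (((PySem.List.pyGet? sent (Int.ofNat (i + 1))).getD ("", "")).1, "V"),
   (PySem.List.pyGet? sent (Int.ofNat (i + 2))).getD ("", ""),
   (((PySem.List.pyGet? sent (Int.ofNat (i + 3))).getD ("", "")).1, "TO"),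
   (((PySem.List.pyGet? sent (Int.ofNat (i + 4))).getD ("", "")).1, "V")]

def pvTag (sent : List (String × String)) (n i : Nat) : List (String × String) :=
  if h : i < n then
    if h2 : i + 4 < n ∧ pvBCond sent i = true then
      pvFive sent i ++ pvTag sent n (i + 5)
    else
      (PySem.List.pyGet? sent (Int.ofNat i)).getD ("", "") :: pvTag sent n (i + 1)
  else []
termination_by n - i

-- the list of match starts (proof-side mirror of pvBScanW without the accumulator)
def pvStarts (sent : List (String × String)) (n i : Nat) : List Nat :=
  if h : i + 4 < n then
    if pvBCond sent i then i :: pvStarts sent n (i + 5) else pvStarts sent n (i + 1)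
  else []
termination_by n - i

theorem pvLor0 (x : Int) : Int.lor 0 x = x := by
  cases x <;> simp [Int.lor, Nat.ldiff]

theorem pvOfNat (m : Nat) : Int.ofNat m = (m : Int) := rfl

theorem pvGuard_iff (i n : Nat) :
    ((Int.ofNat i < Int.lor 0 (Int.ofNat (i + 4))) ∧
     (Int.lor 0 (Int.ofNat (i + 4)) ≥ Int.ofNat n)) ↔ n ≤ i + 4 := by
  rw [pvLor0]
  simp only [pvOfNat]
  omega

-- step lemmas for pvTag
theorem pvTag_stop (sent : List (String × String)) (n i : Nat) (h : ¬ i < n) :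
    pvTag sent n i = [] := by
  rw [pvTag, dif_neg h]

theorem pvTag_hit (sent : List (String × String)) (n i : Nat) (h4 : i + 4 < n)
    (hc : pvBCond sent i = true) :
    pvTag sent n i = pvFive sent i ++ pvTag sent n (i + 5) := by
  rw [pvTag, dif_pos (by omega : i < n), dif_pos ⟨h4, hc⟩]

theorem pvTag_tail (sent : List (String × String)) (n i : Nat) (h : i < n)
    (h2 : ¬ (i + 4 < n ∧ pvBCond sent i = true)) :
    pvTag sent n i = (PySem.List.pyGet? sent (Int.ofNat i)).getD ("", "") :: pvTag sent n (i + 1) := by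
  rw [pvTag, dif_pos h, dif_neg h2]

-- step lemmas for pvStarts
theorem pvStarts_stop (sent : List (String × String)) (n i : Nat) (h : ¬ i + 4 < n) :
    pvStarts sent n i = [] := by
  rw [pvStarts, dif_neg h]

theorem pvStarts_hit (sent : List (String × String)) (n i : Nat) (h4 : i + 4 < n)
    (hc : pvBCond sent i = true) :
    pvStarts sent n i = i :: pvStarts sent n (i + 5) := by
  rw [pvStarts, dif_pos h4, if_pos hc]

theorem pvStarts_miss (sent : List (String × String)) (n i : Nat) (h4 : i + 4 < n)
    (hc : pvBCond sent i = false) :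
    pvStarts sent n i = pvStarts sent n (i + 1) := by
  rw [pvStarts, dif_pos h4, if_neg (by simp [hc])]

-- step lemmas for pvALoopW
theorem pvA_stop (sent : List (String × String)) (n i s : Nat) (acc : List (String × String))
    (h : ¬ i < n) : pvALoopW sent n i s acc = acc := by
  rw [pvALoopW, dif_neg h]

theorem pvA_skip (sent : List (String × String)) (n i s : Nat) (acc : List (String × String))
    (h : i < n) : pvALoopW sent n i (s + 1) acc = pvALoopW sent n (i + 1) s acc := by
  rw [pvALoopW, dif_pos h, if_pos (Nat.succ_pos s)]
  simp

theorem pvA_tail (sent : List (String × String)) (n i : Nat) (acc : List (String × String))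
    (h : i < n) (h4 : n ≤ i + 4) :
    pvALoopW sent n i 0 acc =
      pvALoopW sent n (i + 1) 0 (acc ++ [(PySem.List.pyGet? sent (Int.ofNat i)).getD ("", "")]) := by
  rw [pvALoopW, dif_pos h, if_neg (by omega : ¬ (0 : Nat) > 0), if_pos ((pvGuard_iff i n).2 h4)]

theorem pvA_hit (sent : List (String × String)) (n i : Nat) (acc : List (String × String))
    (h4 : i + 4 < n) (hc : pvBCond sent i = true) :
    pvALoopW sent n i 0 acc = pvALoopW sent n (i + 1) 4 (acc ++ pvFive sent i) := by
  rw [pvALoopW, dif_pos (by omega : i < n), if_neg (by omega : ¬ (0 : Nat) > 0),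
      if_neg (by rw [pvGuard_iff]; omega)]
  have hc' := hc
  simp only [pvBCond] at hc'
  simp only [hc', if_true, pvFive]
  simp

theorem pvA_miss (sent : List (String × String)) (n i : Nat) (acc : List (String × String))
    (h4 : i + 4 < n) (hc : pvBCond sent i = false) :
    pvALoopW sent n i 0 acc =
      pvALoopW sent n (i + 1) 0 (acc ++ [(PySem.List.pyGet? sent (Int.ofNat i)).getD ("", "")]) := by
  rw [pvALoopW, dif_pos (by omega : i < n), if_neg (by omega : ¬ (0 : Nat) > 0),
      if_neg (by rw [pvGuard_iff]; omega)]
  have hc' := hc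
  simp only [pvBCond] at hc'
  simp only [hc']
  simp

-- step lemmas for pvBScanW
theorem pvScan_stop (sent : List (String × String)) (n i : Nat) (s : PySem.Set Nat)
    (h : ¬ i + 4 < n) : pvBScanW sent n i s = s := by
  rw [pvBScanW, dif_neg h]

theorem pvScan_hit (sent : List (String × String)) (n i : Nat) (s : PySem.Set Nat)
    (h4 : i + 4 < n) (hc : pvBCond sent i = true) :
    pvBScanW sent n i s = pvBScanW sent n (i + 5) (PySem.Set.add s i) := by
  rw [pvBScanW, dif_pos h4, if_pos hc]

theorem pvScan_miss (sent : List (String × String)) (n i : Nat) (s : PySem.Set Nat)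
    (h4 : i + 4 < n) (hc : pvBCond sent i = false) :
    pvBScanW sent n i s = pvBScanW sent n (i + 1) s := by
  rw [pvBScanW, dif_pos h4, if_neg (by simp [hc])]

-- the cover test in pass 2, as a proposition
theorem pvCover_iff (S : PySem.Set Nat) (j : Nat) :
    (List.any S (fun k => List.contains [(1 : Int), 2, 3, 4] (Int.ofNat j - Int.ofNat k)) = true)
      ↔ ∃ k ∈ S, k < j ∧ j ≤ k + 4 := by
  rw [List.any_eq_true]
  constructor
  · rintro ⟨k, hk, hp⟩
    refine ⟨k, hk, ?_⟩
    simp only [List.contains_eq_mem, decide_eq_true_eq, List.mem_cons,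
      List.not_mem_nil, or_false, pvOfNat] at hp
    omega
  · rintro ⟨k, hk, h1, h2⟩
    refine ⟨k, hk, ?_⟩
    simp only [List.contains_eq_mem, decide_eq_true_eq, List.mem_cons,
      List.not_mem_nil, or_false, pvOfNat]
    omega

-- step lemmas for pvBEmitW
theorem pvE_stop (sent : List (String × String)) (n : Nat) (S : PySem.Set Nat) (j : Nat)
    (out : List (String × String)) (h : ¬ j < n) : pvBEmitW sent n S j out = out := by
  rw [pvBEmitW, dif_neg h]

theorem pvE_start (sent : List (String × String)) (n : Nat) (S : PySem.Set Nat) (j : Nat)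
    (out : List (String × String)) (h : j < n) (hin : j ∈ S) :
    pvBEmitW sent n S j out = pvBEmitW sent n S (j + 1) (out ++ pvFive sent j) := by
  rw [pvBEmitW, dif_pos h, if_pos ((PySem.Set.contains_iff S j).2 hin)]
  rfl

theorem pvE_cover (sent : List (String × String)) (n : Nat) (S : PySem.Set Nat) (j : Nat)
    (out : List (String × String)) (h : j < n) (hnin : ¬ j ∈ S)
    (hcov : ∃ k ∈ S, k < j ∧ j ≤ k + 4) :
    pvBEmitW sent n S j out = pvBEmitW sent n S (j + 1) out := by
  rw [pvBEmitW, dif_pos h,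
      if_neg (fun hh => hnin ((PySem.Set.contains_iff S j).1 hh)),
      if_pos ((pvCover_iff S j).2 hcov)]

theorem pvE_plain (sent : List (String × String)) (n : Nat) (S : PySem.Set Nat) (j : Nat)
    (out : List (String × String)) (h : j < n) (hnin : ¬ j ∈ S)
    (hncov : ¬ ∃ k ∈ S, k < j ∧ j ≤ k + 4) :
    pvBEmitW sent n S j out =
      pvBEmitW sent n S (j + 1) (out ++ [(PySem.List.pyGet? sent (Int.ofNat j)).getD ("", "")]) := by
  rw [pvBEmitW, dif_pos h,
      if_neg (fun hh => hnin ((PySem.Set.contains_iff S j).1 hh)),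
      if_neg (fun hh => hncov ((pvCover_iff S j).1 hh))]

-- A with a positive skip counter just walks forward
theorem pvALoop_skip (sent : List (String × String)) (n : Nat) :
    ∀ (s i : Nat) (acc : List (String × String)), i + s ≤ n →
      pvALoopW sent n i s acc = pvALoopW sent n (i + s) 0 acc := by
  intro s
  induction s with
  | zero => intro i acc _; rfl
  | succ s ih =>
      intro i acc h
      rw [pvA_skip sent n i s acc (by omega), ih (i + 1) acc (by omega)]
      congr 1
      omega

-- A's loop computes the canonical rewrite
theorem pvALoop_eq_tag (sent : List (String × String)) (n : Nat) :
    ∀ (i : Nat) (acc : List (String × String)),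
      pvALoopW sent n i 0 acc = acc ++ pvTag sent n i := by
  intro i
  induction i using pvTag.induct sent n with
  | case1 i h h2 ih =>
      intro acc
      obtain ⟨h4, hc⟩ := h2
      rw [pvA_hit sent n i acc h4 hc,
          pvALoop_skip sent n 4 (i + 1) _ (by omega)]
      have e : i + 1 + 4 = i + 5 := by omega
      rw [e, ih, pvTag_hit sent n i h4 hc]
      simp
  | case2 i h h2 ih =>
      intro acc
      rw [pvTag_tail sent n i h h2]
      by_cases h4 : n ≤ i + 4
      · rw [pvA_tail sent n i acc h h4, ih]
        simp
      · have hc : pvBCond sent i = false := by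
          rcases Bool.eq_false_or_eq_true (pvBCond sent i) with h' | h'
          · exact absurd ⟨by omega, h'⟩ h2
          · exact h'
        rw [pvA_miss sent n i acc (by omega) hc, ih]
        simp
  | case3 i h =>
      intro acc
      rw [pvA_stop sent n i 0 acc h, pvTag_stop sent n i h]
      simp

-- membership in the scanned set
theorem pvBScan_mem (sent : List (String × String)) (n : Nat) :
    ∀ (i : Nat) (s : PySem.Set Nat) (k : Nat),
      k ∈ pvBScanW sent n i s ↔ k ∈ s ∨ k ∈ pvStarts sent n i := by
  intro i
  induction i using pvStarts.induct sent n with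
  | case1 i h hc ih =>
      intro s k
      rw [pvScan_hit sent n i s h hc, pvStarts_hit sent n i h hc, ih]
      rw [PySem.Set.mem_add]
      simp only [List.mem_cons]
      tauto
  | case2 i h hc ih =>
      intro s k
      rw [pvScan_miss sent n i s h (by simpa using hc),
          pvStarts_miss sent n i h (by simpa using hc), ih]
  | case3 i h =>
      intro s k
      rw [pvScan_stop sent n i s h, pvStarts_stop sent n i h]
      simp

theorem pvStarts_lb (sent : List (String × String)) (n : Nat) :
    ∀ (i k : Nat), k ∈ pvStarts sent n i → i ≤ k := by
  intro i
  induction i using pvStarts.induct sent n with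
  | case1 i h hc ih =>
      intro k hk
      rw [pvStarts_hit sent n i h hc] at hk
      rcases List.mem_cons.1 hk with rfl | hk
      · omega
      · have := ih k hk; omega
  | case2 i h hc ih =>
      intro k hk
      rw [pvStarts_miss sent n i h (by simpa using hc)] at hk
      have := ih k hk; omega
  | case3 i h =>
      intro k hk
      rw [pvStarts_stop sent n i h] at hk
      simp at hk

-- whether i itself is a match start
theorem pvStarts_self (sent : List (String × String)) (n i : Nat) :
    i ∈ pvStarts sent n i ↔ (i + 4 < n ∧ pvBCond sent i = true) := by
  by_cases h : i + 4 < n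
  · by_cases hc : pvBCond sent i = true
    · rw [pvStarts_hit sent n i h hc]
      simp [h, hc]
    · rw [pvStarts_miss sent n i h (by simpa using hc)]
      constructor
      · intro hk; have := pvStarts_lb sent n (i + 1) i hk; omega
      · rintro ⟨-, hc'⟩; exact absurd hc' hc
  · rw [pvStarts_stop sent n i h]
    simp
    omega

-- inside a matched window pass 2 emits nothing
theorem pvBEmit_covered (sent : List (String × String)) (n : Nat) (S : PySem.Set Nat) (i : Nat)
    (hn : i + 4 < n) (hiS : i ∈ S)
    (hfree : ∀ k ∈ S, k = i ∨ k + 5 ≤ i ∨ i + 5 ≤ k) :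
    ∀ (j : Nat) (out : List (String × String)), i < j → j ≤ i + 5 →
      pvBEmitW sent n S j out = pvBEmitW sent n S (i + 5) out := by
  have hm : ∀ m, ∀ (j : Nat) (out : List (String × String)), i + 5 - j ≤ m → i < j → j ≤ i + 5 →
      pvBEmitW sent n S j out = pvBEmitW sent n S (i + 5) out := by
    intro m
    induction m with
    | zero =>
        intro j out h1 h2 h3
        have : j = i + 5 := by omega
        rw [this]
    | succ m ih =>
        intro j out h1 h2 h3
        by_cases hj : j = i + 5
        · rw [hj]
        · have hnot : ¬ j ∈ S := by
            intro hjS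
            rcases hfree j hjS with rfl | hlt | hge <;> omega
          rw [pvE_cover sent n S j out (by omega) hnot ⟨i, hiS, by omega, by omega⟩]
          exact ih (j + 1) out (by omega) (by omega) (by omega)
  exact fun j out h1 h2 => hm (i + 5) j out (by omega) h1 h2

-- pass 2 computes the canonical rewrite, given the two invariants about S
theorem pvBEmit_eq_tag (sent : List (String × String)) (n : Nat) (S : PySem.Set Nat) :
    ∀ (i : Nat),
      (∀ k, i ≤ k → (k ∈ S ↔ k ∈ pvStarts sent n i)) →
      (∀ k ∈ S, k < i → k + 5 ≤ i) →
      ∀ (out : List (String × String)), pvBEmitW sent n S i out = out ++ pvTag sent n i := by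
  intro i
  induction i using pvTag.induct sent n with
  | case1 i h h2 ih =>
      intro hmem hlow out
      obtain ⟨h4, hc⟩ := h2
      have hstarts : pvStarts sent n i = i :: pvStarts sent n (i + 5) :=
        pvStarts_hit sent n i h4 hc
      have hiS : i ∈ S := (hmem i le_rfl).2 (by rw [pvStarts_self]; exact ⟨h4, hc⟩)
      have hfree : ∀ k ∈ S, k = i ∨ k + 5 ≤ i ∨ i + 5 ≤ k := by
        intro k hk
        by_cases hki : k < i
        · right; left; exact hlow k hk hki
        · have hk' := (hmem k (by omega)).1 hk
          rw [hstarts] at hk'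
          rcases List.mem_cons.1 hk' with rfl | h'
          · left; rfl
          · right; right; exact pvStarts_lb sent n (i + 5) k h'
      rw [pvE_start sent n S i out (by omega) hiS,
          pvBEmit_covered sent n S i h4 hiS hfree (i + 1) _ (by omega) (by omega),
          ih ?_ ?_, pvTag_hit sent n i h4 hc]
      · simp
      · intro k hk
        rw [hmem k (by omega), hstarts]
        constructor
        · intro h'
          rcases List.mem_cons.1 h' with rfl | h'
          · omega
          · exact h'
        · intro h'; exact List.mem_cons_of_mem _ h'
      · intro k hk hki
        rcases hfree k hk with rfl | h' | h' <;> omega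
  | case2 i h h2 ih =>
      intro hmem hlow out
      have hnotstart : ¬ i ∈ pvStarts sent n i := by
        rw [pvStarts_self]; exact h2
      have hnot : ¬ i ∈ S := fun hiS => hnotstart ((hmem i le_rfl).1 hiS)
      have hstarts : pvStarts sent n i = pvStarts sent n (i + 1) := by
        by_cases h4 : i + 4 < n
        · exact pvStarts_miss sent n i h4
            (by rcases Bool.eq_false_or_eq_true (pvBCond sent i) with h' | h'
                · exact absurd ⟨h4, h'⟩ h2
                · exact h')
        · rw [pvStarts_stop sent n i h4, pvStarts_stop sent n (i + 1) (by omega)]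
      have hncov : ¬ ∃ k ∈ S, k < i ∧ i ≤ k + 4 := by
        rintro ⟨k, hk, h1', h2'⟩
        have := hlow k hk h1'
        omega
      rw [pvE_plain sent n S i out h hnot hncov, ih ?_ ?_, pvTag_tail sent n i h h2]
      · simp
      · intro k hk
        rw [hmem k (by omega), hstarts]
      · intro k hk hki
        by_cases hki' : k < i
        · have := hlow k hk hki'; omega
        · have hki'' : k = i := by omega
          exact absurd (hki'' ▸ hk) hnot
  | case3 i h =>
      intro _ _ out
      rw [pvE_stop sent n S i out h, pvTag_stop sent n i h]
      simp


-- the fueled port loops agree with their well-founded copies when the fuel suffices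
theorem pvA_bridge (sent : List (String × String)) (n : Nat) :
    ∀ (fuel i skip : Nat) (acc : List (String × String)), n - i ≤ fuel →
      pvALoop sent n fuel i skip acc = pvALoopW sent n i skip acc := by
  intro fuel
  induction fuel with
  | zero =>
      intro i skip acc hf
      rw [pvA_stop sent n i skip acc (by omega)]
      rfl
  | succ fuel ih =>
      intro i skip acc hf
      by_cases h : i < n
      · match skip with
        | s + 1 =>
            rw [pvA_skip sent n i s acc h]
            simp only [pvALoop, if_pos h, if_pos (Nat.succ_pos s), Nat.add_sub_cancel]
            exact ih (i + 1) s acc (by omega)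
        | 0 =>
            by_cases h4 : n ≤ i + 4
            · rw [pvA_tail sent n i acc h h4]
              simp only [pvALoop, if_pos h, if_neg (by omega : ¬ (0 : Nat) > 0),
                if_pos ((pvGuard_iff i n).2 h4)]
              exact ih (i + 1) 0 _ (by omega)
            · by_cases hc : pvBCond sent i = true
              · rw [pvA_hit sent n i acc (by omega) hc]
                have hc' := hc
                simp only [pvBCond] at hc'
                simp only [pvALoop, if_pos h, if_neg (by omega : ¬ (0 : Nat) > 0),
                  if_neg (fun hg => h4 ((pvGuard_iff i n).1 hg)), hc', if_true]
                rw [ih (i + 1) 4 _ (by omega)]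
                congr 1
                simp [pvFive]
              · have hcf : pvBCond sent i = false := by simpa using hc
                rw [pvA_miss sent n i acc (by omega) hcf]
                have hc' := hcf
                simp only [pvBCond] at hc'
                simp only [pvALoop, if_pos h, if_neg (by omega : ¬ (0 : Nat) > 0),
                  if_neg (fun hg => h4 ((pvGuard_iff i n).1 hg)), hc', Bool.false_eq_true,
                  if_false]
                exact ih (i + 1) 0 _ (by omega)
      · rw [pvA_stop sent n i skip acc h]
        simp [pvALoop, h]

theorem pvScan_bridge (sent : List (String × String)) (n : Nat) :
    ∀ (fuel i : Nat) (starts : PySem.Set Nat), n - i ≤ fuel →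
      pvBScan sent n fuel i starts = pvBScanW sent n i starts := by
  intro fuel
  induction fuel with
  | zero =>
      intro i starts hf
      rw [pvScan_stop sent n i starts (by omega)]
      rfl
  | succ fuel ih =>
      intro i starts hf
      by_cases h4 : i + 4 < n
      · by_cases hc : pvBCond sent i = true
        · rw [pvScan_hit sent n i starts h4 hc]
          simp only [pvBScan, if_pos h4, hc, if_true]
          exact ih (i + 5) _ (by omega)
        · have hcf : pvBCond sent i = false := by simpa using hc
          rw [pvScan_miss sent n i starts h4 hcf]
          simp only [pvBScan, if_pos h4, hcf, Bool.false_eq_true, if_false]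
          exact ih (i + 1) starts (by omega)
      · rw [pvScan_stop sent n i starts h4]
        simp [pvBScan, h4]

theorem pvE_bridge (sent : List (String × String)) (n : Nat) (S : PySem.Set Nat) :
    ∀ (fuel j : Nat) (out : List (String × String)), n - j ≤ fuel →
      pvBEmit sent n S fuel j out = pvBEmitW sent n S j out := by
  intro fuel
  induction fuel with
  | zero =>
      intro j out hf
      rw [pvE_stop sent n S j out (by omega)]
      rfl
  | succ fuel ih =>
      intro j out hf
      by_cases h : j < n
      · by_cases hcon : PySem.Set.contains S j = true
        · rw [pvE_start sent n S j out h ((PySem.Set.contains_iff S j).1 hcon)]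
          simp only [pvBEmit, if_pos h, hcon, if_true, pvFive]
          rw [ih (j + 1) _ (by omega)]
        · have hconf : PySem.Set.contains S j = false := by simpa using hcon
          have hnin : ¬ j ∈ S := fun hm => hcon ((PySem.Set.contains_iff S j).2 hm)
          by_cases hany :
              (List.any S (fun k => List.contains [(1 : Int), 2, 3, 4] (Int.ofNat j - Int.ofNat k))) = true
          · rw [pvE_cover sent n S j out h hnin ((pvCover_iff S j).1 hany)]
            simp only [pvBEmit, if_pos h, hconf, Bool.false_eq_true, if_false, hany, if_true]
            exact ih (j + 1) _ (by omega)
          · have hanyf :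
                (List.any S (fun k => List.contains [(1 : Int), 2, 3, 4] (Int.ofNat j - Int.ofNat k))) = false := by
              simpa using hany
            rw [pvE_plain sent n S j out h hnin (fun he => hany ((pvCover_iff S j).2 he))]
            simp only [pvBEmit, if_pos h, hconf, hanyf, Bool.false_eq_true, if_false]
            exact ih (j + 1) _ (by omega)
      · rw [pvE_stop sent n S j out h]
        simp [pvBEmit, h]

-- ===== VERDICT (by name: the statement is the Claim_ definition above) =====
theorem to_UNK_how_to_UNK_Tagger_spec : Claim_equal_to_UNK_how_to_UNK_Tagger := by
  intro sent _
  unfold Spec_to_UNK_how_to_UNK_Tagger to_UNK_how_to_UNK_Tagger to_UNK_how_to_UNK_Tagger_alt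
  show pvALoop sent sent.length sent.length 0 0 [] =
    pvBEmit sent sent.length (pvBScan sent sent.length sent.length 0 PySem.Set.empty)
      sent.length 0 []
  rw [pvA_bridge sent sent.length sent.length 0 0 [] (by omega),
      pvScan_bridge sent sent.length sent.length 0 PySem.Set.empty (by omega),
      pvE_bridge sent sent.length _ sent.length 0 [] (by omega),
      pvALoop_eq_tag sent sent.length 0 []]
  rw [pvBEmit_eq_tag sent sent.length (pvBScanW sent sent.length 0 PySem.Set.empty) 0 ?_ ?_ []]
  · intro k _
    rw [pvBScan_mem]
    simp [PySem.Set.empty]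
  · intro k _ hlt
    omega
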